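-- pv_equiv track=rewrite | github.com/MIC-DKFZ/ToothSeg | toothseg/inhouse_dataset/utils.py | convert_label_ISO_to_continious
-- ===== SOURCE A (Python) =====
-- def convert_label_ISO_to_continious(label_text: str, label_int: str):
--     if label_text == "LOWER_JAW":
--         label_int = 1
--     elif label_text == "UPPER_JAW":
--         label_int = 2
--     elif label_text == "DENTAL_IMPLANT":
--         label_int = 3
--     elif label_text == "NON_TOOTH_SUPPORTED_CROWN":
--         label_int = 4
--     else:
--         # up to 8 teeth per row. oof
--         assert label_int != ""
--         dct = {10 + i: 4 + i for i in range(1, 9)}  # [11 - 18] -> [5 - 12]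
--         dct.update({20 + i: 12 + i for i in range(1, 9)})  # [21 - 28] -> [13 - 20]
--         dct.update({30 + i: 20 + i for i in range(1, 9)})  # [31 - 38] -> [21 - 28]
--         dct.update({40 + i: 28 + i for i in range(1, 9)})  # [41 - 48] -> [29 - 36]
--
--         # in addition some kids got milk teeth. Oof. up to 5 more per row
--         dct.update({50 + i: 36 + i for i in range(1, 6)})
--         dct.update({60 + i: 41 + i for i in range(1, 6)})
--         dct.update({70 + i: 46 + i for i in range(1, 6)})
--         dct.update({80 + i: 51 + i for i in range(1, 6)})
--
--         label_int = dct[int(label_int)]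
--     return label_int
-- ===== SOURCE B (Python) =====
-- def convert_label_ISO_to_continious(label_text: str, label_int: str):
--     if label_text == "LOWER_JAW":
--         return 1
--     if label_text == "UPPER_JAW":
--         return 2
--     if label_text == "DENTAL_IMPLANT":
--         return 3
--     if label_text == "NON_TOOTH_SUPPORTED_CROWN":
--         return 4
--     assert label_int != ""
--     n = int(label_int)
--     q, u = divmod(n, 10)
--     if 1 <= q <= 4 and 1 <= u <= 8:        # permanent teeth 11-48
--         return (q - 1) * 8 + u + 4
--     if 5 <= q <= 8 and 1 <= u <= 5:        # milk teeth 51-85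
--         return 32 + (q - 5) * 5 + u + 4
--     raise KeyError(n)
-- ===== Notes on version B (the rewrite author's own statement) =====
-- stated objective: simpler
-- what changed: The 52-entry dict built from eight comprehensions is replaced by closed-form arithmetic on quotient/remainder of the FDI code (q = n//10, u = n%10), with early returns instead of reassigning label_int.
import Mathlib
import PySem

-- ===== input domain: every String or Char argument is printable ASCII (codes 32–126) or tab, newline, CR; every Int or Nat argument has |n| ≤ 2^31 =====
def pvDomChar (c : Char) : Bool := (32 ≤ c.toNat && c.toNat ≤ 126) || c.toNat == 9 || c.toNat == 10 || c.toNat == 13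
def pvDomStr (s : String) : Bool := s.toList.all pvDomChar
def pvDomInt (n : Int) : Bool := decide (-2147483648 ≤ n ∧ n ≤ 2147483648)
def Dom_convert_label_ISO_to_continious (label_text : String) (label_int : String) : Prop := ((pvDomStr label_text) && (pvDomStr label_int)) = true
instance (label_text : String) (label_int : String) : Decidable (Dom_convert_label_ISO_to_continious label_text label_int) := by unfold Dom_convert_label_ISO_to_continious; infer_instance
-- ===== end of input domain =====

-- B replaces A's 52-entry dict (eight comprehensions) with closed-form arithmetic on n//10 and n%10 (simpler).

-- ===== PORT A =====
-- the dict A builds in its else branch (eight update loops, insertion order as in A)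
def pvDctA : PySem.Dict Int Int :=
  let d := (PySem.List.pyRange 1 9 1).foldl (fun d i => d.insert (10 + i) (4 + i)) PySem.Dict.empty
  let d := (PySem.List.pyRange 1 9 1).foldl (fun d i => d.insert (20 + i) (12 + i)) d
  let d := (PySem.List.pyRange 1 9 1).foldl (fun d i => d.insert (30 + i) (20 + i)) d
  let d := (PySem.List.pyRange 1 9 1).foldl (fun d i => d.insert (40 + i) (28 + i)) d
  let d := (PySem.List.pyRange 1 6 1).foldl (fun d i => d.insert (50 + i) (36 + i)) d
  let d := (PySem.List.pyRange 1 6 1).foldl (fun d i => d.insert (60 + i) (41 + i)) d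
  let d := (PySem.List.pyRange 1 6 1).foldl (fun d i => d.insert (70 + i) (46 + i)) d
  (PySem.List.pyRange 1 6 1).foldl (fun d i => d.insert (80 + i) (51 + i)) d

def convert_label_ISO_to_continious (label_text : String) (label_int : String) : Int :=
  if label_text = "LOWER_JAW" then 1
  else if label_text = "UPPER_JAW" then 2
  else if label_text = "DENTAL_IMPLANT" then 3
  else if label_text = "NON_TOOTH_SUPPORTED_CROWN" then 4
  else
    -- assert label_int != "" raises where ofStr? "" = none; both excluded by Pre_
    let n := (PySem.Int.ofStr? label_int).getD 0      -- none = ValueError, excluded by Pre_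
    (pvDctA.get? n).getD 0                            -- none = KeyError, excluded by Pre_

-- ===== PORT B =====
def convert_label_ISO_to_continious_alt (label_text : String) (label_int : String) : Int :=
  if label_text = "LOWER_JAW" then 1
  else if label_text = "UPPER_JAW" then 2
  else if label_text = "DENTAL_IMPLANT" then 3
  else if label_text = "NON_TOOTH_SUPPORTED_CROWN" then 4
  else
    let n := (PySem.Int.ofStr? label_int).getD 0      -- none = ValueError, excluded by Pre_
    let q := PySem.Int.floordiv n 10
    let u := PySem.Int.mod n 10
    if 1 ≤ q ∧ q ≤ 4 ∧ 1 ≤ u ∧ u ≤ 8 then (q - 1) * 8 + u + 4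
    else if 5 ≤ q ∧ q ≤ 8 ∧ 1 ≤ u ∧ u ≤ 5 then 32 + (q - 5) * 5 + u + 4
    else 0                                            -- raise KeyError, excluded by Pre_

-- ===== PRECONDITION & SPEC =====
-- is n one of the 52 valid FDI tooth codes (keys of A's dict)?
def pvValidCode (n : Int) : Bool :=
  let q := PySem.Int.floordiv n 10
  let u := PySem.Int.mod n 10
  (1 ≤ q && q ≤ 4 && 1 ≤ u && u ≤ 8) || (5 ≤ q && q ≤ 8 && 1 ≤ u && u ≤ 5)

-- Pre_ excludes exactly the inputs where A raises: non-tooth label_text with label_int empty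
-- (AssertionError), not an int literal (ValueError), or not a valid FDI code (KeyError).
def Pre_convert_label_ISO_to_continious (label_text : String) (label_int : String) : Prop :=
  label_text = "LOWER_JAW" ∨ label_text = "UPPER_JAW" ∨ label_text = "DENTAL_IMPLANT" ∨
  label_text = "NON_TOOTH_SUPPORTED_CROWN" ∨
  (PySem.Int.ofStr? label_int).any pvValidCode = true
instance (label_text : String) (label_int : String) : Decidable (Pre_convert_label_ISO_to_continious label_text label_int) := by unfold Pre_convert_label_ISO_to_continious; infer_instance

def pvWitness_convert_label_ISO_to_continious : String × String := ("TOOTH", "11")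

def Spec_convert_label_ISO_to_continious (label_text : String) (label_int : String) (out : Int) : Prop := out = convert_label_ISO_to_continious_alt label_text label_int
instance (label_text : String) (label_int : String) (out : Int) : Decidable (Spec_convert_label_ISO_to_continious label_text label_int out) := by unfold Spec_convert_label_ISO_to_continious; infer_instance

-- ===== CLAIM (what is proved, stated in full; the proofs are below) =====
def Claim_equal_convert_label_ISO_to_continious : Prop := ∀ (label_text : String) (label_int : String), Dom_convert_label_ISO_to_continious label_text label_int → Pre_convert_label_ISO_to_continious label_text label_int → Spec_convert_label_ISO_to_continious label_text label_int (convert_label_ISO_to_continious label_text label_int)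

-- ===== LEMMAS AND PROOFS =====
-- on every valid FDI code the dict lookup equals B's closed form
set_option maxHeartbeats 2000000 in
set_option maxRecDepth 4000 in
theorem pv_key (n : Int) (h : pvValidCode n = true) :
    (pvDctA.get? n).getD 0 =
      (let q := PySem.Int.floordiv n 10
       let u := PySem.Int.mod n 10
       if 1 ≤ q ∧ q ≤ 4 ∧ 1 ≤ u ∧ u ≤ 8 then (q - 1) * 8 + u + 4
       else if 5 ≤ q ∧ q ≤ 8 ∧ 1 ≤ u ∧ u ≤ 5 then 32 + (q - 5) * 5 + u + 4
       else 0) := by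
  have hsum := PySem.Int.floordiv_mul_add_mod n 10
  have hmlo := PySem.Int.mod_nonneg n (b := 10) (by norm_num)
  have hmhi := PySem.Int.mod_lt n (b := 10) (by norm_num)
  have hb : 11 ≤ n ∧ n ≤ 85 := by
    unfold pvValidCode at h
    set q := PySem.Int.floordiv n 10 with hq
    set u := PySem.Int.mod n 10 with hu
    simp only [Bool.or_eq_true, Bool.and_eq_true, decide_eq_true_eq] at h
    omega
  obtain ⟨hlo, hhi⟩ := hb
  interval_cases n <;> revert h <;> decide

theorem convert_label_ISO_pointwise (label_text : String) (label_int : String)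
    (hp : Pre_convert_label_ISO_to_continious label_text label_int) :
    convert_label_ISO_to_continious label_text label_int =
      convert_label_ISO_to_continious_alt label_text label_int := by
  unfold convert_label_ISO_to_continious convert_label_ISO_to_continious_alt
  split_ifs with h1 h2 h3 h4
  · rfl
  · rfl
  · rfl
  · rfl
  -- else branch: Pre_ forces a valid parsed code
  unfold Pre_convert_label_ISO_to_continious at hp
  rcases hp with h | h | h | h | h
  · exact absurd h h1
  · exact absurd h h2
  · exact absurd h h3
  · exact absurd h h4
  · cases hn : PySem.Int.ofStr? label_int with
    | none => rw [hn] at h; simp at h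
    | some n =>
      rw [hn] at h
      simp only [Option.any_some] at h
      simpa using pv_key n h

-- ===== VERDICT (by name: the statement is the Claim_ definition above) =====
theorem convert_label_ISO_to_continious_spec : Claim_equal_convert_label_ISO_to_continious := by
  intro label_text label_int _ hp
  exact convert_label_ISO_pointwise label_text label_int hp
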